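-- pv_equiv track=rewrite | github.com/paulabaal12/ACT3-DLP | main.py | procesar_buffer
-- ===== SOURCE A (Python) =====
-- def procesar_buffer(buffer, lexema_incompleto):
--     #Se procesan y extraen los lexemas del buffer
--     lexemas = []
--     lexema_actual = lexema_incompleto
--     for caracter in buffer:
--         if caracter.isspace() or caracter == "eof":
--             if lexema_actual:
--                 lexemas.append(lexema_actual)
--                 lexema_actual = ""
--             if caracter == "eof":
--                 break
--         else:
--             lexema_actual += caracter
--     return lexemas, lexema_actual
-- ===== SOURCE B (Python) =====
-- from itertools import groupby
--
--
-- def procesar_buffer(buffer, lexema_incompleto):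
--     # Tokenize the buffer by runs: cut at the first "eof", then walk the
--     # whitespace/non-whitespace runs, starting each piece after a boundary.
--     try:
--         segment, hit_eof = buffer[:buffer.index("eof")], True
--     except ValueError:
--         segment, hit_eof = buffer, False
--     pieces = [lexema_incompleto]
--     for ws, run in groupby(segment, key=str.isspace):
--         if ws:
--             pieces.append("")
--         else:
--             pieces[-1] += "".join(run)
--     *done, last = pieces
--     if hit_eof:
--         done.append(last)
--         last = ""
--     return [t for t in done if t], last
-- ===== Notes on version B (the rewrite author's own statement) =====
-- stated objective: idiomatic
-- what changed: Replaces the stateful character-by-character accumulator loop with a run-based decomposition: cut the buffer at the first 'eof', group it into whitespace/non-whitespace runs with itertools.groupby, and fold the runs into a list of pieces (a boundary run starts a fresh piece, a token run extends the last one, the carried lexema_incompleto seeds the first), then return the non-empty completed pieces and the trailing piece.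
import Mathlib
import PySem

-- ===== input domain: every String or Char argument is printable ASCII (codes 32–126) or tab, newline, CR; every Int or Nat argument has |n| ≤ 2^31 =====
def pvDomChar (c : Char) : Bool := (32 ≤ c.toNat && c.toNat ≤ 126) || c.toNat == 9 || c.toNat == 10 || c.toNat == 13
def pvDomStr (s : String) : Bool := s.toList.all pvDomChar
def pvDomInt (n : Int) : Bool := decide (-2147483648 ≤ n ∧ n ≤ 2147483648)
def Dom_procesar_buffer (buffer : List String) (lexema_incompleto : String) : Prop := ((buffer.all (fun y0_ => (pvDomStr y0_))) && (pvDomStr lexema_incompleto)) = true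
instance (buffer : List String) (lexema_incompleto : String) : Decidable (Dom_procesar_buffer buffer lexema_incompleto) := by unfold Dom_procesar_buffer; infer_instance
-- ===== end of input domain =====

-- B tokenises by runs instead of characters: cut at the first "eof", walk the
-- whitespace/non-whitespace runs (groupby), starting a fresh piece after each
-- boundary; same value, similar cost (objective: idiomatic).

-- ===== PORT A =====
-- A's loop, step for step; the growing lexema_actual is carried as List Char
-- (exact code points; Lean's own String.append is kernel-opaque, so += is ++ on toList).
def pvAloop : List String → List String → List Char → List String × String
  | [], lexemas, cur => (lexemas, String.ofList cur)
  | c :: rest, lexemas, cur =>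
    if PySem.Str.strIsspace c || c == "eof" then
      -- 'if lexema_actual:' (truthiness = nonempty): append and reset;
      -- 'if caracter == "eof": break' (lexema_actual is "" here in both branches)
      if c == "eof" then ((if cur ≠ [] then lexemas ++ [String.ofList cur] else lexemas), "")
      else pvAloop rest (if cur ≠ [] then lexemas ++ [String.ofList cur] else lexemas) []
    else pvAloop rest lexemas (cur ++ c.toList)

def procesar_buffer (buffer : List String) (lexema_incompleto : String) : List String × String :=
  pvAloop buffer [] lexema_incompleto.toList

-- ===== PORT B =====
-- helpers mirror Source B: groupby(key=str.isspace), ''.join, the pieces fold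
def pvIsWS (s : String) : Bool := PySem.Str.strIsspace s

-- itertools.groupby(segment, key=str.isspace): maximal runs with their key
def pvGroupby : List String → List (Bool × List String)
  | [] => []
  | c :: rest =>
    (pvIsWS c, c :: rest.takeWhile (fun x => pvIsWS x == pvIsWS c)) ::
      pvGroupby (rest.dropWhile (fun x => pvIsWS x == pvIsWS c))
termination_by l => l.length
decreasing_by
  simpa using Nat.lt_succ_of_le (List.length_dropWhile_le _ _)

-- ''.join(run), on code points
def pvJoin (g : List String) : List Char := (g.map String.toList).flatten

-- the loop body: a whitespace run starts a fresh piece, a token run extends the last one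
def pvStep (pieces : List (List Char)) (p : Bool × List String) : List (List Char) :=
  if p.1 then pieces ++ [[]]
  else pieces.dropLast ++ [pieces.getLastD [] ++ pvJoin p.2]

def procesar_buffer_alt (buffer : List String) (lexema_incompleto : String) : List String × String :=
  let (segment, hit_eof) :=
    match PySem.List.index? buffer "eof" with
    | some i => (buffer.take i, true)
    | none => (buffer, false)
  let pieces := (pvGroupby segment).foldl pvStep [lexema_incompleto.toList]
  let done := pieces.dropLast
  let last := pieces.getLastD []
  if hit_eof then (((done ++ [last]).filter (· ≠ [])).map String.ofList, "")
  else ((done.filter (· ≠ [])).map String.ofList, String.ofList last)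

-- ===== PRECONDITION & SPEC =====
def Spec_procesar_buffer (buffer : List String) (lexema_incompleto : String) (out : List String × String) : Prop := out = procesar_buffer_alt buffer lexema_incompleto
instance (buffer : List String) (lexema_incompleto : String) (out : List String × String) : Decidable (Spec_procesar_buffer buffer lexema_incompleto out) := by unfold Spec_procesar_buffer; infer_instance

-- ===== CLAIM (what is proved, stated in full; the proofs are below) =====
def Claim_equal_procesar_buffer : Prop := ∀ (buffer : List String) (lexema_incompleto : String), Dom_procesar_buffer buffer lexema_incompleto → Spec_procesar_buffer buffer lexema_incompleto (procesar_buffer buffer lexema_incompleto)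

-- ===== LEMMAS AND PROOFS =====

-- proof-only spec of B's fold: done pieces and the pending piece, recursively
def pvPGroups : List (Bool × List String) → List Char → List (List Char) × List Char
  | [], cur => ([], cur)
  | (true, _) :: gs, cur =>
      let r := pvPGroups gs []
      (cur :: r.1, r.2)
  | (false, g) :: gs, cur => pvPGroups gs (cur ++ pvJoin g)

theorem pvIsWS_eof : pvIsWS "eof" = false := by decide

-- B's foldl over the groups, characterised by pvPGroups
theorem pvFoldl_step (gs : List (Bool × List String)) :
    ∀ (ps : List (List Char)) (cur : List Char),
    List.foldl pvStep (ps ++ [cur]) gs =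
      ps ++ (pvPGroups gs cur).1 ++ [(pvPGroups gs cur).2] := by
  induction gs with
  | nil => intro ps cur; simp [pvPGroups]
  | cons g gs ih =>
    intro ps cur
    obtain ⟨b, run⟩ := g
    cases b with
    | true =>
      have h1 : List.foldl pvStep (ps ++ [cur]) ((true, run) :: gs) =
          List.foldl pvStep ((ps ++ [cur]) ++ [[]]) gs := by
        simp [pvStep]
      rw [h1, ih (ps ++ [cur]) []]
      simp [pvPGroups]
    | false =>
      have : pvStep (ps ++ [cur]) (false, run) = ps ++ [cur ++ pvJoin run] := by
        simp [pvStep]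
      simp only [List.foldl_cons, this, ih]
      simp [pvPGroups]

-- a whitespace run with an empty current lexeme is a no-op for A
theorem pvAloop_ws (g : List String) (hg : ∀ x ∈ g, pvIsWS x = true) (rest : List String)
    (lexemas : List String) :
    pvAloop (g ++ rest) lexemas [] = pvAloop rest lexemas [] := by
  induction g with
  | nil => rfl
  | cons x t ih =>
    have hx := hg x (by simp)
    have hne : x ≠ "eof" := by rintro rfl; simp [pvIsWS_eof] at hx
    simp only [List.cons_append, pvAloop]
    rw [if_pos, if_neg (by simpa using hne)]
    · simpa using ih (fun y hy => hg y (by simp [hy]))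
    · simp [pvIsWS] at hx; simp [hx]

-- a run of non-whitespace, non-"eof" elements just extends A's current lexeme
theorem pvAloop_nonws (g : List String) (hg : ∀ x ∈ g, pvIsWS x = false ∧ x ≠ "eof")
    (rest : List String) (lexemas : List String) (cur : List Char) :
    pvAloop (g ++ rest) lexemas cur = pvAloop rest lexemas (cur ++ pvJoin g) := by
  induction g generalizing cur with
  | nil => simp [pvJoin]
  | cons x t ih =>
    obtain ⟨hx, hne⟩ := hg x (by simp)
    simp only [List.cons_append, pvAloop]
    rw [if_neg]
    · rw [ih (fun y hy => hg y (by simp [hy]))]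
      simp [pvJoin]
    · simp [pvIsWS] at hx; simp [hx, hne]

-- ===== core characterisation: A's loop on an "eof"-free segment = B's pieces =====
theorem pvAloop_noeof : ∀ (segment : List String), "eof" ∉ segment →
    ∀ (lexemas : List String) (cur : List Char),
    pvAloop segment lexemas cur =
      (lexemas ++
        ((pvPGroups (pvGroupby segment) cur).1.filter (· ≠ [])).map String.ofList,
       String.ofList (pvPGroups (pvGroupby segment) cur).2)
  | [], _, lexemas, cur => by
    simp [pvAloop, pvGroupby, pvPGroups]
  | c :: rest, h, lexemas, cur => by
    simp only [List.mem_cons, not_or] at h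
    have hce : c ≠ "eof" := fun hx => h.1 hx.symm
    have hre : "eof" ∉ rest := h.2
    have hsplit := List.takeWhile_append_dropWhile
      (p := fun x => pvIsWS x == pvIsWS c) (l := rest)
    have hre' : "eof" ∉ rest.dropWhile (fun x => pvIsWS x == pvIsWS c) := by
      intro hm
      exact hre (by rw [← hsplit]; exact List.mem_append_right _ hm)
    have hg : ∀ x ∈ rest.takeWhile (fun x => pvIsWS x == pvIsWS c), pvIsWS x = pvIsWS c := by
      intro x hx
      simpa using List.mem_takeWhile_imp hx
    have hIH := pvAloop_noeof (rest.dropWhile (fun x => pvIsWS x == pvIsWS c)) hre'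
    rw [pvGroupby]
    by_cases hk : pvIsWS c = true
    · -- c is a whitespace boundary: the run flushes cur and recursion restarts empty
      have hk' : PySem.Str.strIsspace c = true := hk
      have hstep : pvAloop (c :: rest) lexemas cur =
          pvAloop (rest.dropWhile (fun x => pvIsWS x == pvIsWS c))
            (if cur ≠ [] then lexemas ++ [String.ofList cur] else lexemas) [] := by
        simp only [pvAloop]
        rw [if_pos (by rw [hk']; rfl), if_neg (by simpa using hce)]
        conv_lhs => rw [← hsplit]
        exact pvAloop_ws _ (fun x hx => by rw [hg x hx, hk]) _ _
      rw [hstep, hIH, hk]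
      simp only [pvPGroups]
      rw [List.filter_cons]
      by_cases hc : cur = [] <;> simp [hc]
    · -- c starts (or extends) a lexeme
      have hk0 : pvIsWS c = false := by simpa using hk
      have hgf : ∀ x ∈ c :: rest.takeWhile (fun x => pvIsWS x == pvIsWS c),
          pvIsWS x = false ∧ x ≠ "eof" := by
        intro x hx
        rcases List.mem_cons.mp hx with rfl | hx
        · exact ⟨hk0, hce⟩
        · refine ⟨by rw [hg x hx, hk0], ?_⟩
          intro hxe
          exact hre (hxe ▸ (List.takeWhile_prefix _).subset hx)
      have hstep : pvAloop (c :: rest) lexemas cur =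
          pvAloop (rest.dropWhile (fun x => pvIsWS x == pvIsWS c)) lexemas
            (cur ++ pvJoin (c :: rest.takeWhile (fun x => pvIsWS x == pvIsWS c))) := by
        conv_lhs => rw [show c :: rest =
          (c :: rest.takeWhile (fun x => pvIsWS x == pvIsWS c)) ++
            rest.dropWhile (fun x => pvIsWS x == pvIsWS c) by simp [hsplit]]
        exact pvAloop_nonws _ hgf _ _ _
      rw [hstep, hIH, hk0]
      simp [pvPGroups]
  termination_by segment => segment.length
  decreasing_by simpa using Nat.lt_succ_of_le (List.length_dropWhile_le _ _)

-- running into "eof": A flushes the pending lexeme and clears it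
theorem pvAloop_eof (seg : List String) (h : "eof" ∉ seg) (tail : List String)
    (lexemas : List String) (cur : List Char) :
    pvAloop (seg ++ "eof" :: tail) lexemas cur =
      ((pvAloop seg lexemas cur).1 ++
        (if (pvAloop seg lexemas cur).2 ≠ "" then [(pvAloop seg lexemas cur).2] else []), "") := by
  induction seg generalizing lexemas cur with
  | nil =>
    simp only [List.nil_append, pvAloop]
    rw [if_pos (by simp), if_pos (by simp)]
    rcases eq_or_ne cur [] with rfl | hc
    · simp
    · simp [hc, String.ofList_eq_empty_iff]
  | cons x t ih =>
    simp only [List.mem_cons, not_or] at h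
    have hne : x ≠ "eof" := fun hx => h.1 hx.symm
    have h' : "eof" ∉ t := h.2
    simp only [List.cons_append, pvAloop]
    by_cases hb : (PySem.Str.strIsspace x || x == "eof") = true
    · rw [if_pos hb, if_pos hb,
        if_neg (show ¬((x == "eof") = true) by simpa using hne),
        if_neg (show ¬((x == "eof") = true) by simpa using hne)]
      exact ih h' _ _
    · rw [if_neg hb, if_neg hb]; exact ih h' _ _

-- B's pieces for a segment, read off as (done, last)
theorem pvAlt_pieces (segment : List String) (cur : List Char) :
    ((pvGroupby segment).foldl pvStep [cur]).dropLast = (pvPGroups (pvGroupby segment) cur).1 ∧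
    ((pvGroupby segment).foldl pvStep [cur]).getLastD [] = (pvPGroups (pvGroupby segment) cur).2 := by
  have := pvFoldl_step (pvGroupby segment) [] cur
  simp only [List.nil_append] at this
  rw [this]
  constructor
  · simp
  · simp

-- ===== VERDICT (by name: the statement is the Claim_ definition above) =====
theorem procesar_buffer_spec : Claim_equal_procesar_buffer := by
  intro buffer inc _
  unfold Spec_procesar_buffer procesar_buffer procesar_buffer_alt
  rcases heq : PySem.List.index? buffer "eof" with _ | i
  · have hnm : "eof" ∉ buffer := (PySem.List.index?_eq_none_iff _ _).mp heq
    obtain ⟨h1, h2⟩ := pvAlt_pieces buffer inc.toList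
    simp only [pvAloop_noeof buffer hnm [] inc.toList, h1, h2]
    simp
  · obtain ⟨pre, suf, hbuf, hlen, hnm⟩ := ((PySem.List.index?_eq_some_iff buffer "eof" i).mp heq)
    subst hbuf
    have htake : (pre ++ "eof" :: suf).take i = pre := by
      subst hlen; simp
    obtain ⟨h1, h2⟩ := pvAlt_pieces pre inc.toList
    simp only [htake, pvAloop_eof pre hnm suf [] inc.toList,
      pvAloop_noeof pre hnm [] inc.toList, h1, h2]
    rw [List.filter_append, List.filter_cons]
    rcases eq_or_ne (pvPGroups (pvGroupby pre) inc.toList).2 [] with hl | hl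
    · simp [hl]
    · simp [hl, String.ofList_eq_empty_iff]
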